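-- pv_equiv track=rewrite | github.com/Matematik411/Project_Euler | Euler_vol2.py | naloga39
-- ===== SOURCE A (Python) =====
-- def je_pitagorejska_trojica(trojica):
--     '''Preveri ali dana stevila ustrezajo Pitagorovem izreku.'''
--     return trojica[0] ** 2 + trojica[1] ** 2 == trojica[2] ** 2
--
-- def naloga39(n):
--     '''For which value of p ≤ n, is the number of solutions maximised?'''
--     resitev = 0
--     for vsota in range(12, n + 1):
--         stevilo_trojic = 0
--         for a in range(vsota // 2):
--             for b in range(vsota // 3):
--                 if je_pitagorejska_trojica([a, b, vsota - a - b]):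
--                     stevilo_trojic += 1
--         if stevilo_trojic > resitev:
--             odklikovan_primer = vsota
--             resitev = stevilo_trojic
--     return odklikovan_primer
-- ===== SOURCE B (Python) =====
-- def naloga39(n):
--     # For each perimeter p, solve a^2 + b^2 = (p-a-b)^2 for b in closed form:
--     # 2*b*(p-a) = p*(p-2a), so at most one b per (p, a); no inner b-loop.
--     best = 0
--     best_p = None
--     for p in range(12, n + 1):
--         cnt = 0
--         for a in range(p // 2):
--             q, r = divmod(p * (p - 2 * a), 2 * (p - a))
--             if r == 0 and q < p // 3:
--                 cnt += 1
--         if cnt > best: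
--             best = cnt
--             best_p = p
--     return best_p
-- ===== Notes on version B (the rewrite author's own statement) =====
-- stated objective: faster
-- what changed: Instead of scanning all b in the innermost loop, B solves a^2+b^2=(p-a-b)^2 for b in closed form via divmod, removing the inner scan (O(n^3) -> O(n^2)).
import Mathlib
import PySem

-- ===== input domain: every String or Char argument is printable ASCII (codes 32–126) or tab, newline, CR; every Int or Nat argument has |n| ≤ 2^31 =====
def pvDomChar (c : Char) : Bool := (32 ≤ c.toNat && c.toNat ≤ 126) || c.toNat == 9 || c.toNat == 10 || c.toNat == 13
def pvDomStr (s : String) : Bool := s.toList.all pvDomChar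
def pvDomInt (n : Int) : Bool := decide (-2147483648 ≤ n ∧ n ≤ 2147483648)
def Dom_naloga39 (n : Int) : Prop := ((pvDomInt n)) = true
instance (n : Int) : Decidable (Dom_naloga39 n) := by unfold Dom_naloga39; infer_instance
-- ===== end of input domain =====

-- B changes the algorithm: the innermost b-loop is replaced by solving the equation for b
-- in closed form with divmod (asymptotically faster; measured faster in a timing run).
-- A raises (UnboundLocalError) for n < 12, excluded by Pre_.

-- ===== PORT A =====
-- trojica is always a 3-element list here, so pyGetD with default 0 is exact
def je_pitagorejska_trojica (trojica : List Int) : Bool :=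
  PySem.List.pyGetD trojica 0 0 ^ 2 + PySem.List.pyGetD trojica 1 0 ^ 2
    == PySem.List.pyGetD trojica 2 0 ^ 2

def naloga39 (n : Int) : Int :=
  let st := (PySem.List.pyRange 12 (n + 1) 1).foldl
    (fun (s : Int × Option Int) vsota =>
      let stevilo_trojic :=
        (PySem.List.pyRange 0 (PySem.Int.floordiv vsota 2) 1).foldl
          (fun c a =>
            (PySem.List.pyRange 0 (PySem.Int.floordiv vsota 3) 1).foldl
              (fun c b =>
                if je_pitagorejska_trojica [a, b, vsota - a - b] then c + 1 else c)
              c)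
          (0 : Int)
      if stevilo_trojic > s.1 then (stevilo_trojic, some vsota) else s)
    ((0 : Int), (none : Option Int))
  st.2.getD 0   -- none = 'odklikovan_primer' never assigned = UnboundLocalError, excluded by Pre_

-- ===== PORT B =====
def naloga39_alt (n : Int) : Int :=
  let st := (PySem.List.pyRange 12 (n + 1) 1).foldl
    (fun (s : Int × Option Int) p =>
      let cnt :=
        (PySem.List.pyRange 0 (PySem.Int.floordiv p 2) 1).foldl
          (fun c a =>
            match PySem.Int.divmod? (p * (p - 2 * a)) (2 * (p - a)) with
            | some (q, r) =>
                if r = 0 ∧ q < PySem.Int.floordiv p 3 then c + 1 else c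
            | none => c)   -- divisor 2*(p-a) is never 0 in the loop; guard only makes it total
          (0 : Int)
      if cnt > s.1 then (cnt, some p) else s)
    ((0 : Int), (none : Option Int))
  st.2.getD 0   -- none = best_p is still None, B returns None, excluded by Pre_

-- ===== PRECONDITION & SPEC =====
-- Pre_ excludes n < 12: there A raises UnboundLocalError (no perimeter ever scores) and B returns None.
def Pre_naloga39 (n : Int) : Prop := 12 ≤ n
instance (n : Int) : Decidable (Pre_naloga39 n) := by unfold Pre_naloga39; infer_instance
def pvWitness_naloga39 : Int := 15

def Spec_naloga39 (n : Int) (out : Int) : Prop := out = naloga39_alt n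
instance (n : Int) (out : Int) : Decidable (Spec_naloga39 n out) := by unfold Spec_naloga39; infer_instance

-- ===== CLAIM (what is proved, stated in full; the proofs are below) =====
def Claim_equal_naloga39 : Prop := ∀ (n : Int), Dom_naloga39 n → Pre_naloga39 n → Spec_naloga39 n (naloga39 n)

-- ===== LEMMAS AND PROOFS =====

-- the Pythagorean test, unfolded to an arithmetic equation
theorem pyth_iff (a b c : Int) :
    je_pitagorejska_trojica [a, b, c] = true ↔ a ^ 2 + b ^ 2 = c ^ 2 := by
  simp [je_pitagorejska_trojica, PySem.List.pyGetD]

-- the equation, linearised in b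
theorem eq_lin (p a b : Int) :
    a ^ 2 + b ^ 2 = (p - a - b) ^ 2 ↔ 2 * (p - a) * b = p * (p - 2 * a) := by
  constructor <;> intro h <;> nlinarith [h]

-- the inner b-loop of A counts exactly the one solution B's divmod finds
theorem inner_eq (p a c : Int) (hp : 12 ≤ p) (ha : 0 ≤ a) (ha2 : a < PySem.Int.floordiv p 2) :
    (PySem.List.pyRange 0 (PySem.Int.floordiv p 3) 1).foldl
      (fun c b => if je_pitagorejska_trojica [a, b, p - a - b] then c + 1 else c) c
    = (match PySem.Int.divmod? (p * (p - 2 * a)) (2 * (p - a)) with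
       | some (q, r) => if r = 0 ∧ q < PySem.Int.floordiv p 3 then c + 1 else c
       | none => c) := by
  have hfd2 : PySem.Int.floordiv p 2 = p / 2 := by
    simp [PySem.Int.floordiv, Int.fdiv_eq_ediv]
  rw [hfd2] at ha2
  have hden : 0 < 2 * (p - a) := by omega
  have hnum : 0 < p * (p - 2 * a) := mul_pos (by omega) (by omega)
  have hdm : PySem.Int.divmod? (p * (p - 2 * a)) (2 * (p - a))
      = some ((p * (p - 2 * a)).fdiv (2 * (p - a)), (p * (p - 2 * a)).fmod (2 * (p - a))) := by
    simp [PySem.Int.divmod?]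
    omega
  rw [hdm]
  simp only []
  set m3 := PySem.Int.floordiv p 3 with hm3def
  set q := (p * (p - 2 * a)).fdiv (2 * (p - a)) with hqdef
  set r := (p * (p - 2 * a)).fmod (2 * (p - a)) with hrdef
  have hqr : 2 * (p - a) * q + r = p * (p - 2 * a) := by
    rw [hqdef, hrdef]; exact Int.mul_fdiv_add_fmod _ _
  have hr0 : 0 ≤ r := by rw [hrdef]; exact Int.fmod_nonneg (le_of_lt hnum) (le_of_lt hden)
  have hrlt : r < 2 * (p - a) := by rw [hrdef]; exact Int.fmod_lt_of_pos _ hden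
  have hq0 : 0 ≤ q := by nlinarith
  have hpred : ∀ b : Int, (je_pitagorejska_trojica [a, b, p - a - b] = true) ↔
      2 * (p - a) * b = p * (p - 2 * a) := fun b => (pyth_iff a b (p - a - b)).trans (eq_lin p a b)
  rw [PySem.List.foldl_if_add_one]
  by_cases hcase : r = 0 ∧ q < m3
  · rw [if_pos hcase]
    have hcnt : List.countP (fun b => je_pitagorejska_trojica [a, b, p - a - b])
        (PySem.List.pyRange 0 m3 1) = 1 := by
      have hcg : List.countP (fun b => je_pitagorejska_trojica [a, b, p - a - b])
          (PySem.List.pyRange 0 m3 1)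
          = List.countP (fun b => b == q) (PySem.List.pyRange 0 m3 1) := by
        apply List.countP_congr
        intro b _
        rw [hpred b]
        constructor
        · intro hb
          have : 2 * (p - a) * b = 2 * (p - a) * q := by omega
          have := mul_left_cancel₀ (by omega : (2 * (p - a) : Int) ≠ 0) this
          simp [this]
        · intro hb
          have hb' : b = q := by simpa using hb
          rw [hb']
          omega
      rw [hcg]
      have : List.countP (fun b => b == q) (PySem.List.pyRange 0 m3 1)
          = List.count q (PySem.List.pyRange 0 m3 1) := rfl
      rw [this]
      exact List.count_eq_one_of_mem (PySem.List.nodup_pyRange_one 0 m3)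
        (PySem.List.mem_pyRange_one.mpr ⟨hq0, hcase.2⟩)
    rw [hcnt]
    omega
  · rw [if_neg hcase]
    have hcnt : List.countP (fun b => je_pitagorejska_trojica [a, b, p - a - b])
        (PySem.List.pyRange 0 m3 1) = 0 := by
      rw [List.countP_eq_zero]
      intro b hb
      rw [PySem.List.mem_pyRange_one] at hb
      simp only [hpred b]
      intro heq
      have hbq : b = q := by
        rcases lt_trichotomy b q with h | h | h
        · nlinarith [mul_pos hden (show (0:Int) < q - b by omega)]
        · exact h
        · nlinarith [mul_pos hden (show (0:Int) < b - q by omega)]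
      subst hbq
      exact hcase ⟨by omega, hb.2⟩
    rw [hcnt]
    omega

-- ===== VERDICT (by name: the statement is the Claim_ definition above) =====
theorem naloga39_spec : Claim_equal_naloga39 := by
  intro n _ _
  unfold Spec_naloga39 naloga39 naloga39_alt
  simp only []
  congr 1
  congr 1
  apply PySem.List.foldl_congr_mem
  intro s p hp
  rw [PySem.List.mem_pyRange_one] at hp
  have hc : ∀ (c a : Int), a ∈ PySem.List.pyRange 0 (PySem.Int.floordiv p 2) 1 →
      (PySem.List.pyRange 0 (PySem.Int.floordiv p 3) 1).foldl
        (fun c b => if je_pitagorejska_trojica [a, b, p - a - b] then c + 1 else c) c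
      = (match PySem.Int.divmod? (p * (p - 2 * a)) (2 * (p - a)) with
         | some (q, r) => if r = 0 ∧ q < PySem.Int.floordiv p 3 then c + 1 else c
         | none => c) := by
    intro c a hamem
    rw [PySem.List.mem_pyRange_one] at hamem
    exact inner_eq p a c hp.1 hamem.1 hamem.2
  rw [PySem.List.foldl_congr_mem _ _ _ _ (fun c a ha => hc c a ha)]
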